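-- pv_equiv track=rewrite | github.com/mcdowellj43/Argus_backend | modules/default_credentials.py | assess_default_credentials_risk
-- ===== SOURCE A (Python) =====
-- def assess_default_credentials_risk(results):
--     """Assess security risk level of default credentials findings"""
--     findings = []
--     severity = "I"
--
--     vulnerabilities = results.get("vulnerabilities", [])
--
--     if not vulnerabilities:
--         return findings, severity
--
--     # Count vulnerabilities by service type
--     service_counts = {}
--     for vuln in vulnerabilities:
--         service = vuln.get("service", "Unknown")
--         service_counts[service] = service_counts.get(service, 0) + 1
--
--     # Critical findings - SSH, RDP, Database access
--     critical_services = ["SSH", "RDP", "MySQL", "PostgreSQL", "MongoDB"]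
--     critical_count = sum(service_counts.get(service, 0) for service in critical_services)
--
--     if critical_count > 0:
--         severity = "C"
--         findings.append(f"Critical default credentials: {critical_count} high-risk service access points")
--
--         # List critical vulnerabilities
--         critical_vulns = [v for v in vulnerabilities if v.get("service") in critical_services]
--         for vuln in critical_vulns[:3]:  # Show first 3
--             service = vuln.get("service", "Unknown")
--             username = vuln.get("username", "Unknown")
--             password = vuln.get("password", "Unknown")
--             findings.append(f"Critical: {service} access with {username}:{password}")
--
--     # High findings - HTTP, FTP, Telnet
--     high_services = ["HTTP", "FTP", "Telnet"]
--     high_count = sum(service_counts.get(service, 0) for service in high_services)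
--
--     if high_count > 0:
--         if severity == "I":
--             severity = "H"
--         findings.append(f"High-risk default credentials: {high_count} service access points")
--
--     # Medium findings - Other services
--     other_services = [s for s in service_counts.keys() if s not in critical_services + high_services]
--     other_count = sum(service_counts.get(service, 0) for service in other_services)
--
--     if other_count > 0:
--         if severity == "I":
--             severity = "M"
--         findings.append(f"Medium-risk default credentials: {other_count} service access points")
--
--     # Overall assessment
--     total_vulns = len(vulnerabilities)
--     if total_vulns > 5:
--         if severity not in ["C", "H"]:
--             severity = "H"
--         findings.append(f"Multiple default credentials: {total_vulns} vulnerable access points")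
--
--     return findings, severity
-- ===== SOURCE B (Python) =====
-- def assess_default_credentials_risk(results):
--     """Assess security risk level of default credentials findings"""
--     vulnerabilities = results.get("vulnerabilities", [])
--     if not vulnerabilities:
--         return [], "I"
--
--     CRITICAL = {"SSH", "RDP", "MySQL", "PostgreSQL", "MongoDB"}
--     HIGH = {"HTTP", "FTP", "Telnet"}
--
--     # one linear pass: classify every vulnerability directly
--     critical_count = high_count = other_count = 0
--     critical_vulns = []
--     for vuln in vulnerabilities:
--         service = vuln.get("service", "Unknown")
--         if service in CRITICAL:
--             critical_count += 1
--             critical_vulns.append(vuln)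
--         elif service in HIGH:
--             high_count += 1
--         else:
--             other_count += 1
--
--     total_vulns = len(vulnerabilities)
--
--     findings = []
--     if critical_count > 0:
--         findings.append(f"Critical default credentials: {critical_count} high-risk service access points")
--         findings += [
--             f"Critical: {v.get('service', 'Unknown')} access with {v.get('username', 'Unknown')}:{v.get('password', 'Unknown')}"
--             for v in critical_vulns[:3]
--         ]
--     if high_count > 0:
--         findings.append(f"High-risk default credentials: {high_count} service access points")
--     if other_count > 0:
--         findings.append(f"Medium-risk default credentials: {other_count} service access points")
--     if total_vulns > 5:
--         findings.append(f"Multiple default credentials: {total_vulns} vulnerable access points")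
--
--     severity = ("C" if critical_count > 0
--                 else "H" if high_count > 0 or total_vulns > 5
--                 else "M" if other_count > 0
--                 else "I")
--     return findings, severity
-- ===== Notes on version B (the rewrite author's own statement) =====
-- stated objective: simpler
-- what changed: B drops the service_counts dictionary and its three later sum/filter queries, classifying each vulnerability once in a single linear pass into critical/high/other counters (collecting the critical records on the way) and computing the severity as one conditional chain instead of A's sequential severity-overwrite cascade.
import Mathlib
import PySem

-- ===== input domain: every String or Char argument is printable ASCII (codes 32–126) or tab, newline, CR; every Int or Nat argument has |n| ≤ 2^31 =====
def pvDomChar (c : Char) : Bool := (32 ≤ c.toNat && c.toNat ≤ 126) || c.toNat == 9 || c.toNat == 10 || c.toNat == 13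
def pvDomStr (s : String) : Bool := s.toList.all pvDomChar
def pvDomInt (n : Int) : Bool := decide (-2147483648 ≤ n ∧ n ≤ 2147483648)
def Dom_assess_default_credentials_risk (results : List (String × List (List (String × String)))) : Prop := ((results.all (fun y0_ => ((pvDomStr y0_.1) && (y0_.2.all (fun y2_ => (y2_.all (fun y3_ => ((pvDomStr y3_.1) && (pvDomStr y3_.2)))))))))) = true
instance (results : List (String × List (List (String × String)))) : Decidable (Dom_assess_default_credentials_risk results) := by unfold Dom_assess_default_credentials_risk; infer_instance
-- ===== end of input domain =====

-- B replaces A's service_counts dict (one counting loop plus three separate sum/filter queries over it)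
-- by a single classifying pass keeping the three counters and the critical list directly; objective: simpler.

-- ===== PORT A =====
def assess_default_credentials_risk (results : List (String × List (List (String × String)))) : List String × String :=
  let findings : List String := []
  let severity : String := "I"
  let vulnerabilities := (PySem.Dict.mk results).getD "vulnerabilities" []
  if vulnerabilities = [] then (findings, severity) else
  let service_counts := vulnerabilities.foldl (fun d vuln =>
      let service := (PySem.Dict.mk vuln).getD "service" "Unknown"
      d.insert service (d.getD service 0 + 1)) PySem.Dict.empty
  let critical_services : List String := ["SSH", "RDP", "MySQL", "PostgreSQL", "MongoDB"]
  let critical_count : Int := (critical_services.map (fun s => service_counts.getD s 0)).sum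
  let st1 : List String × String :=
    if critical_count > 0 then
      let findings := findings ++ ["Critical default credentials: " ++ PySem.Int.toStr critical_count ++ " high-risk service access points"]
      let critical_vulns := vulnerabilities.filter (fun v =>
        match (PySem.Dict.mk v).get? "service" with
        | some s => critical_services.contains s
        | none => false)
      let findings := (PySem.List.slice critical_vulns none (some 3)).foldl (fun fs vuln =>
          let service := (PySem.Dict.mk vuln).getD "service" "Unknown"
          let username := (PySem.Dict.mk vuln).getD "username" "Unknown"
          let password := (PySem.Dict.mk vuln).getD "password" "Unknown"
          fs ++ ["Critical: " ++ service ++ " access with " ++ username ++ ":" ++ password]) findings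
      (findings, "C")
    else (findings, severity)
  let high_services : List String := ["HTTP", "FTP", "Telnet"]
  let high_count : Int := (high_services.map (fun s => service_counts.getD s 0)).sum
  let st2 : List String × String :=
    if high_count > 0 then
      (st1.1 ++ ["High-risk default credentials: " ++ PySem.Int.toStr high_count ++ " service access points"],
       if st1.2 = "I" then "H" else st1.2)
    else st1
  let other_services := service_counts.keys.filter (fun s => !((critical_services ++ high_services).contains s))
  let other_count : Int := (other_services.map (fun s => service_counts.getD s 0)).sum
  let st3 : List String × String :=
    if other_count > 0 then
      (st2.1 ++ ["Medium-risk default credentials: " ++ PySem.Int.toStr other_count ++ " service access points"],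
       if st2.2 = "I" then "M" else st2.2)
    else st2
  let total_vulns : Int := vulnerabilities.length
  let st4 : List String × String :=
    if total_vulns > 5 then
      (st3.1 ++ ["Multiple default credentials: " ++ PySem.Int.toStr total_vulns ++ " vulnerable access points"],
       if ¬ (st3.2 ∈ (["C", "H"] : List String)) then "H" else st3.2)
    else st3
  st4

-- ===== PORT B =====
-- state of B's single pass: (critical_count, high_count, other_count, critical_vulns)
def pvAltStep (st : Int × Int × Int × List (List (String × String))) (vuln : List (String × String)) :
    Int × Int × Int × List (List (String × String)) :=
  let service := (PySem.Dict.mk vuln).getD "service" "Unknown"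
  if (PySem.Set.ofList ["SSH", "RDP", "MySQL", "PostgreSQL", "MongoDB"]).contains service then
    (st.1 + 1, st.2.1, st.2.2.1, st.2.2.2 ++ [vuln])
  else if (PySem.Set.ofList ["HTTP", "FTP", "Telnet"]).contains service then
    (st.1, st.2.1 + 1, st.2.2.1, st.2.2.2)
  else
    (st.1, st.2.1, st.2.2.1 + 1, st.2.2.2)

def assess_default_credentials_risk_alt (results : List (String × List (List (String × String)))) : List String × String :=
  let vulnerabilities := (PySem.Dict.mk results).getD "vulnerabilities" []
  if vulnerabilities = [] then ([], "I") else
  let st := vulnerabilities.foldl pvAltStep (0, 0, 0, [])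
  let critical_count := st.1
  let high_count := st.2.1
  let other_count := st.2.2.1
  let critical_vulns := st.2.2.2
  let total_vulns : Int := vulnerabilities.length
  let findings :=
    (if critical_count > 0 then
       ["Critical default credentials: " ++ PySem.Int.toStr critical_count ++ " high-risk service access points"]
       ++ (PySem.List.slice critical_vulns none (some 3)).map (fun v =>
            "Critical: " ++ (PySem.Dict.mk v).getD "service" "Unknown" ++ " access with "
              ++ (PySem.Dict.mk v).getD "username" "Unknown" ++ ":" ++ (PySem.Dict.mk v).getD "password" "Unknown")
     else [])
    ++ (if high_count > 0 then ["High-risk default credentials: " ++ PySem.Int.toStr high_count ++ " service access points"] else [])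
    ++ (if other_count > 0 then ["Medium-risk default credentials: " ++ PySem.Int.toStr other_count ++ " service access points"] else [])
    ++ (if total_vulns > 5 then ["Multiple default credentials: " ++ PySem.Int.toStr total_vulns ++ " vulnerable access points"] else [])
  let severity :=
    if critical_count > 0 then "C"
    else if high_count > 0 ∨ total_vulns > 5 then "H"
    else if other_count > 0 then "M"
    else "I"
  (findings, severity)

-- ===== PRECONDITION & SPEC =====
def Spec_assess_default_credentials_risk (results : List (String × List (List (String × String)))) (out : List String × String) : Prop := out = assess_default_credentials_risk_alt results
instance (results : List (String × List (List (String × String)))) (out : List String × String) : Decidable (Spec_assess_default_credentials_risk results out) := by unfold Spec_assess_default_credentials_risk; infer_instance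

-- ===== CLAIM (what is proved, stated in full; the proofs are below) =====
def Claim_equal_assess_default_credentials_risk : Prop := ∀ (results : List (String × List (List (String × String)))), Dom_assess_default_credentials_risk results → Spec_assess_default_credentials_risk results (assess_default_credentials_risk results)

-- ===== LEMMAS AND PROOFS =====

-- the service of a vulnerability record, as both programs read it
def pvSvc (v : List (String × String)) : String := (PySem.Dict.mk v).getD "service" "Unknown"

lemma pv_set_crit : PySem.Set.ofList ["SSH", "RDP", "MySQL", "PostgreSQL", "MongoDB"] = ["SSH", "RDP", "MySQL", "PostgreSQL", "MongoDB"] := by decide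
lemma pv_set_high : PySem.Set.ofList ["HTTP", "FTP", "Telnet"] = ["HTTP", "FTP", "Telnet"] := by decide

-- the two service categories are disjoint, for any string
lemma pv_high_not_crit (s : String) (h : (["HTTP", "FTP", "Telnet"] : List String).contains s = true) :
    (["SSH", "RDP", "MySQL", "PostgreSQL", "MongoDB"] : List String).contains s = false := by
  simp only [List.contains_eq_mem, List.mem_cons, List.not_mem_nil, or_false, decide_eq_true_eq] at h
  rcases h with h | h | h <;> subst h <;> decide

-- Σ over a nodup key list of "1 if the key is x" = "1 if x lies in the key list"
lemma pv_sum_ite_eq (ks : List String) (x : String) (hnd : ks.Nodup) :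
    (ks.map (fun k => if x == k then (1 : Int) else 0)).sum = if ks.contains x then 1 else 0 := by
  induction ks with
  | nil => simp
  | cons a ks ih =>
    rcases List.nodup_cons.mp hnd with ⟨ha2, hnd2⟩
    by_cases hax : x = a
    · subst hax
      have hc : ks.contains x = false := by
        simp only [List.contains_eq_mem, decide_eq_false_iff_not]; exact ha2
      simp only [List.map_cons, List.sum_cons, List.contains_cons, ih hnd2, hc, BEq.rfl]
      simp
    · have hb : (x == a) = false := by simpa using hax
      simp only [List.map_cons, List.sum_cons, List.contains_cons, ih hnd2, hb]
      simp

-- Σ over a nodup key list ks of (count of the key in ss) = number of elements of ss lying in ks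
lemma pv_sum_count (ss ks : List String) (hnd : ks.Nodup) :
    (ks.map (fun k => ((ss.count k : Int)))).sum = (ss.countP (fun x => ks.contains x) : Int) := by
  induction ss with
  | nil => simp
  | cons y ss ih =>
    have hcnt : ∀ k : String, ((y :: ss).count k : Int) = (ss.count k : Int) + (if y == k then (1 : Int) else 0) := by
      intro k
      by_cases h : y = k
      · subst h; simp
      · have hb : (y == k) = false := by simpa using h
        simp [List.count_cons, hb]
    calc (ks.map (fun k => (((y :: ss).count k : Int)))).sum
        = (ks.map (fun k => ((ss.count k : Int) + (if y == k then (1 : Int) else 0)))).sum := by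
          simp only [hcnt]
      _ = (ks.map (fun k => ((ss.count k : Int)))).sum + (ks.map (fun k => if y == k then (1 : Int) else 0)).sum := by
          exact PySem.List.sum_map_add_int ks _ _
      _ = (ss.countP (fun x => ks.contains x) : Int) + (if ks.contains y then 1 else 0) := by
          rw [ih, pv_sum_ite_eq ks y hnd]
      _ = ((y :: ss).countP (fun x => ks.contains x) : Int) := by
          by_cases h : ks.contains y
          · simp [List.countP_cons, h]
          · simp [List.countP_cons, h]

-- B's single pass, characterised: counters count the three categories, and the critical records are kept in order
lemma pv_foldB (vulns : List (List (String × String))) (c h o : Int) (cv : List (List (String × String))) :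
    vulns.foldl pvAltStep (c, h, o, cv) =
      (c + (vulns.countP (fun v => (["SSH", "RDP", "MySQL", "PostgreSQL", "MongoDB"] : List String).contains (pvSvc v)) : Int),
       h + (vulns.countP (fun v => (["HTTP", "FTP", "Telnet"] : List String).contains (pvSvc v)) : Int),
       o + (vulns.countP (fun v => !((["SSH", "RDP", "MySQL", "PostgreSQL", "MongoDB"] : List String) ++ ["HTTP", "FTP", "Telnet"]).contains (pvSvc v)) : Int),
       cv ++ vulns.filter (fun v => (["SSH", "RDP", "MySQL", "PostgreSQL", "MongoDB"] : List String).contains (pvSvc v))) := by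
  induction vulns generalizing c h o cv with
  | nil => simp
  | cons v vulns ih =>
    simp only [List.foldl_cons, List.countP_cons, List.filter_cons]
    by_cases hc : (["SSH", "RDP", "MySQL", "PostgreSQL", "MongoDB"] : List String).contains (pvSvc v) = true
    · rw [show pvAltStep (c, h, o, cv) v = (c + 1, h, o, cv ++ [v]) from by
        simp only [pvAltStep, pv_set_crit, pv_set_high, PySem.Set.contains]
        rw [show (PySem.Dict.mk v).getD "service" "Unknown" = pvSvc v from rfl, hc]
        simp]
      rw [ih]
      have hh : (["HTTP", "FTP", "Telnet"] : List String).contains (pvSvc v) = false := by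
        by_contra hx
        simp only [Bool.not_eq_false] at hx
        rw [pv_high_not_crit _ hx] at hc; cases hc
      have hch : ((["SSH", "RDP", "MySQL", "PostgreSQL", "MongoDB"] : List String) ++ ["HTTP", "FTP", "Telnet"]).contains (pvSvc v) = true := by
        rw [List.contains_append, hc]; rfl
      simp only [hc, hh, hch, Bool.not_true, Prod.mk.injEq, if_true, if_false, Bool.false_eq_true]
      refine ⟨by push_cast; ring, by push_cast; ring, by push_cast; ring, by simp⟩
    · simp only [Bool.not_eq_true] at hc
      by_cases hh : (["HTTP", "FTP", "Telnet"] : List String).contains (pvSvc v) = true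
      · rw [show pvAltStep (c, h, o, cv) v = (c, h + 1, o, cv) from by
          simp only [pvAltStep, pv_set_crit, pv_set_high, PySem.Set.contains]
          rw [show (PySem.Dict.mk v).getD "service" "Unknown" = pvSvc v from rfl, hc, hh]
          simp]
        rw [ih]
        have hch : ((["SSH", "RDP", "MySQL", "PostgreSQL", "MongoDB"] : List String) ++ ["HTTP", "FTP", "Telnet"]).contains (pvSvc v) = true := by
          rw [List.contains_append, hh]; simp
        simp only [hc, hh, hch, Bool.not_true, Prod.mk.injEq, if_true, if_false, Bool.false_eq_true]
        refine ⟨by push_cast; ring, by push_cast; ring, by push_cast; ring, by simp⟩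
      · simp only [Bool.not_eq_true] at hh
        rw [show pvAltStep (c, h, o, cv) v = (c, h, o + 1, cv) from by
          simp only [pvAltStep, pv_set_crit, pv_set_high, PySem.Set.contains]
          rw [show (PySem.Dict.mk v).getD "service" "Unknown" = pvSvc v from rfl, hc, hh]
          simp]
        rw [ih]
        have hch : ((["SSH", "RDP", "MySQL", "PostgreSQL", "MongoDB"] : List String) ++ ["HTTP", "FTP", "Telnet"]).contains (pvSvc v) = false := by
          rw [List.contains_append, hc, hh]; rfl
        simp only [hc, hh, hch, Bool.not_false, Prod.mk.injEq, if_true, if_false, Bool.false_eq_true]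
        refine ⟨by push_cast; ring, by push_cast; ring, by push_cast; ring, by simp⟩

lemma pv_main (results : List (String × List (List (String × String)))) :
    assess_default_credentials_risk results = assess_default_credentials_risk_alt results := by
  unfold assess_default_credentials_risk assess_default_credentials_risk_alt
  set vulns := (PySem.Dict.mk results).getD "vulnerabilities" [] with hv
  by_cases hemp : vulns = []
  · simp [hemp]
  · simp only [hemp, if_false]
    -- A's counting loop builds the counter of the service multiset
    have hsc : (vulns.foldl (fun d vuln => d.insert ((PySem.Dict.mk vuln).getD "service" "Unknown") (d.getD ((PySem.Dict.mk vuln).getD "service" "Unknown") 0 + 1)) PySem.Dict.empty) = PySem.Dict.counter (vulns.map pvSvc) := by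
      rw [← PySem.Dict.foldl_insert_getD_add_one_eq_counter, List.foldl_map]
      rfl
    rw [hsc]
    -- A's three queries against the counter are B's three direct counts
    have hcrit : (((["SSH", "RDP", "MySQL", "PostgreSQL", "MongoDB"] : List String)).map (fun s => (PySem.Dict.counter (vulns.map pvSvc)).getD s 0)).sum
        = (vulns.countP (fun v => (["SSH", "RDP", "MySQL", "PostgreSQL", "MongoDB"] : List String).contains (pvSvc v)) : Int) := by
      simp only [PySem.Dict.getD_counter]
      rw [pv_sum_count _ _ (by decide), List.countP_map]
      rfl
    have hhigh : (((["HTTP", "FTP", "Telnet"] : List String)).map (fun s => (PySem.Dict.counter (vulns.map pvSvc)).getD s 0)).sum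
        = (vulns.countP (fun v => (["HTTP", "FTP", "Telnet"] : List String).contains (pvSvc v)) : Int) := by
      simp only [PySem.Dict.getD_counter]
      rw [pv_sum_count _ _ (by decide), List.countP_map]
      rfl
    have hmem : ∀ x ∈ vulns.map pvSvc,
        (((PySem.Set.ofList (vulns.map pvSvc)).filter (fun s => !((["SSH", "RDP", "MySQL", "PostgreSQL", "MongoDB"] : List String) ++ ["HTTP", "FTP", "Telnet"]).contains s)).contains x) = true
          ↔ (!((["SSH", "RDP", "MySQL", "PostgreSQL", "MongoDB"] : List String) ++ ["HTTP", "FTP", "Telnet"]).contains x) = true := by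
      intro x hx
      simp [List.contains_eq_mem, List.mem_filter, PySem.Set.mem_ofList, hx]
    have hother : ((((PySem.Dict.counter (vulns.map pvSvc)).keys).filter (fun s => !((["SSH", "RDP", "MySQL", "PostgreSQL", "MongoDB"] : List String) ++ ["HTTP", "FTP", "Telnet"]).contains s)).map (fun s => (PySem.Dict.counter (vulns.map pvSvc)).getD s 0)).sum
        = (vulns.countP (fun v => !((["SSH", "RDP", "MySQL", "PostgreSQL", "MongoDB"] : List String) ++ ["HTTP", "FTP", "Telnet"]).contains (pvSvc v)) : Int) := by
      rw [PySem.Dict.keys_counter]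
      simp only [PySem.Dict.getD_counter]
      rw [pv_sum_count _ _ ((PySem.Set.nodup_ofList _).filter _)]
      rw [List.countP_congr hmem, List.countP_map]
      rfl
    -- A's critical filter (get? with no default) agrees with B's (getD "Unknown"): "Unknown" is not critical
    have hfilt : (fun (v : List (String × String)) => (match (PySem.Dict.mk v).get? "service" with
        | some s => (["SSH", "RDP", "MySQL", "PostgreSQL", "MongoDB"] : List String).contains s
        | none => false))
        = (fun v => (["SSH", "RDP", "MySQL", "PostgreSQL", "MongoDB"] : List String).contains (pvSvc v)) := by
      funext v
      rcases hq : (PySem.Dict.mk v).get? "service" with _ | s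
      · simp [pvSvc, PySem.Dict.getD, hq]
      · simp [pvSvc, PySem.Dict.getD, hq]
    rw [hcrit, hhigh, hother, hfilt, pv_foldB]
    simp only [zero_add, List.nil_append]
    rw [PySem.List.foldl_append_singleton_eq_map]
    clear hsc hmem hfilt hcrit hhigh hother hv hemp
    clear_value vulns
    set C := (vulns.countP (fun v => (["SSH", "RDP", "MySQL", "PostgreSQL", "MongoDB"] : List String).contains (pvSvc v)) : Int) with hC
    set H2 := (vulns.countP (fun v => (["HTTP", "FTP", "Telnet"] : List String).contains (pvSvc v)) : Int) with hH
    set O := (vulns.countP (fun v => !((["SSH", "RDP", "MySQL", "PostgreSQL", "MongoDB"] : List String) ++ ["HTTP", "FTP", "Telnet"]).contains (pvSvc v)) : Int) with hO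
    set CV := vulns.filter (fun v => (["SSH", "RDP", "MySQL", "PostgreSQL", "MongoDB"] : List String).contains (pvSvc v)) with hCV
    set T := (vulns.length : Int) with hT
    clear_value C H2 O CV T
    clear hC hH hO hCV hT vulns
    split_ifs <;> simp_all [List.append_assoc] <;> omega

-- ===== VERDICT (by name: the statement is the Claim_ definition above) =====
theorem assess_default_credentials_risk_spec : Claim_equal_assess_default_credentials_risk := by
  intro results _
  unfold Spec_assess_default_credentials_risk
  exact pv_main results
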